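-- pv_equiv track=rewrite | github.com/anagonda-ai/desktop | src/plant_mgc_analysis/metabolic/kegg_integration.py | parse_flat_entry
-- ===== SOURCE A (Python) =====
-- from typing import Dict, List, Optional, Set, Any, Tuple
--
-- def parse_flat_entry(entry_text: str) -> Dict[str, str]:
--     """
--     Parse KEGG flat file entry.
--
--     Args:
--         entry_text: Raw entry text
--
--     Returns:
--         Dictionary of parsed fields
--     """
--     parsed = {}
--     current_key = None
--
--     for line in entry_text.splitlines():
--         if not line.strip():
--             continue
--
--         # Check if line starts with a field name
--         field_name = line[:12].strip()
--
--         if field_name: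
--             current_key = field_name
--             parsed[current_key] = line[12:].strip()
--         else:
--             # Continuation line
--             if current_key:
--                 parsed[current_key] += " " + line[12:].strip()
--
--     return parsed
-- ===== SOURCE B (Python) =====
-- def parse_flat_entry(entry_text: str):
--     """Parse KEGG flat file entry (block-grouping re-implementation)."""
--     lines = [l for l in entry_text.splitlines() if l.strip()]
--     parsed = {}
--     for key, parts in _records(lines):
--         parsed[key] = " ".join(parts)
--     return parsed
--
--
-- def _records(lines):
--     """Group non-blank lines into (field_name, [stripped pieces]) blocks."""
--     if not lines:
--         return []
--     key = lines[0][:12].strip()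
--     if not key:
--         # leading continuation line with no field yet: ignored
--         return _records(lines[1:])
--     i = 1
--     while i < len(lines) and not lines[i][:12].strip():
--         i += 1
--     parts = [l[12:].strip() for l in lines[:i]]
--     return [(key, parts)] + _records(lines[i:])
-- ===== Notes on version B (the rewrite author's own statement) =====
-- stated objective: alternative
-- what changed: Replaces the single stateful loop (current_key + in-place string concatenation into the dict) by a two-phase design: a recursive grouping pass that partitions the non-blank lines into (field, [pieces]) blocks, then a pass that joins each block and builds the dict.
import Mathlib
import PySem

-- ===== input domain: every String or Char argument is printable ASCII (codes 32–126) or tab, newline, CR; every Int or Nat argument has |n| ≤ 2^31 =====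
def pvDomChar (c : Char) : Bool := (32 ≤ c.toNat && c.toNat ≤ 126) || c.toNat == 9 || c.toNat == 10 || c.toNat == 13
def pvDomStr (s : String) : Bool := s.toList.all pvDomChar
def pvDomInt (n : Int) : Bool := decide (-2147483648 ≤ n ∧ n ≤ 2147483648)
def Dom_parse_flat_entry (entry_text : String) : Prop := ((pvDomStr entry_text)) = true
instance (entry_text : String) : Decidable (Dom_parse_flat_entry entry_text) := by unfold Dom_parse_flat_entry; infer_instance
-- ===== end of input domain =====

-- B re-implements the parser as a grouping pass (blocks of field + continuation lines) followed by a
-- join-and-build pass, instead of A's single stateful loop; same cost, alternative decomposition.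

-- ===== PORT A =====
-- 'parsed[current_key] += " " + …' is ported as Dict.modify with default "": exact here, because
-- current_key is always a key of parsed whenever it is set.
def parse_flat_entry (entry_text : String) : List (String × String) :=
  let st := (PySem.Str.splitlines entry_text).foldl
    (fun (st : PySem.Dict String String × Option String) line =>
      if PySem.Str.strip line = "" then st
      else
        let field_name := PySem.Str.strip (PySem.Str.slice line none (some 12))
        if field_name = "" then
          match st.2 with
          | some k =>
            (st.1.modify k "" (fun v => v ++ " " ++ PySem.Str.strip (PySem.Str.slice line (some 12) none)), st.2)
          | none => st
        else
          (st.1.insert field_name (PySem.Str.strip (PySem.Str.slice line (some 12) none)), some field_name))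
    (PySem.Dict.empty, none)
  st.1.items

-- ===== PORT B =====
-- helper _span_cont: split off the leading continuation lines (empty first-12-char field)
def pvSpanCont : List String → List String × List String
  | [] => ([], [])
  | l :: rest =>
    if PySem.Str.strip (PySem.Str.slice l none (some 12)) = "" then
      (l :: (pvSpanCont rest).1, (pvSpanCont rest).2)
    else ([], l :: rest)

theorem pvSpanCont_snd_length : ∀ ls : List String, (pvSpanCont ls).2.length ≤ ls.length := by
  intro ls
  induction ls with
  | nil => simp [pvSpanCont]
  | cons l rest ih =>
    simp only [pvSpanCont]
    split
    · exact Nat.le_trans ih (Nat.le_succ _)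
    · simp

-- helper _records: group non-blank lines into (field_name, [stripped pieces]) blocks
def pvRecords : List String → List (String × List String)
  | [] => []
  | l :: rest =>
    let key := PySem.Str.strip (PySem.Str.slice l none (some 12))
    if key = "" then pvRecords rest
    else
      (key, PySem.Str.strip (PySem.Str.slice l (some 12) none) ::
              (pvSpanCont rest).1.map (fun c => PySem.Str.strip (PySem.Str.slice c (some 12) none)))
        :: pvRecords (pvSpanCont rest).2
termination_by ls => ls.length
decreasing_by
  · simp
  · exact Nat.lt_succ_of_le (pvSpanCont_snd_length rest)

def parse_flat_entry_alt (entry_text : String) : List (String × String) :=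
  let lines := (PySem.Str.splitlines entry_text).filter (fun l => decide ¬(PySem.Str.strip l = ""))
  ((pvRecords lines).foldl
      (fun d kv => d.insert kv.1 (PySem.Str.join " " kv.2)) PySem.Dict.empty).items

-- ===== PRECONDITION & SPEC =====
def Spec_parse_flat_entry (entry_text : String) (out : List (String × String)) : Prop := out = parse_flat_entry_alt entry_text
instance (entry_text : String) (out : List (String × String)) : Decidable (Spec_parse_flat_entry entry_text out) := by unfold Spec_parse_flat_entry; infer_instance

-- ===== CLAIM (what is proved, stated in full; the proofs are below) =====
def Claim_equal_parse_flat_entry : Prop := ∀ (entry_text : String), Dom_parse_flat_entry entry_text → Spec_parse_flat_entry entry_text (parse_flat_entry entry_text)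

-- ===== LEMMAS AND PROOFS =====

-- A's loop body once the blank-line test has been factored out
def pvStepA (st : PySem.Dict String String × Option String) (line : String) :
    PySem.Dict String String × Option String :=
  let field_name := PySem.Str.strip (PySem.Str.slice line none (some 12))
  if field_name = "" then
    match st.2 with
    | some k =>
      (st.1.modify k "" (fun v => v ++ " " ++ PySem.Str.strip (PySem.Str.slice line (some 12) none)), st.2)
    | none => st
  else
    (st.1.insert field_name (PySem.Str.strip (PySem.Str.slice line (some 12) none)), some field_name)

-- the head of ls (if any) carries a field name
def pvHeadKeyed (ls : List String) : Prop :=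
  ∀ l ∈ ls.head?, ¬ (PySem.Str.strip (PySem.Str.slice l none (some 12)) = "")

theorem pvSpanCont_append (ls : List String) : (pvSpanCont ls).1 ++ (pvSpanCont ls).2 = ls := by
  induction ls with
  | nil => simp [pvSpanCont]
  | cons l rest ih =>
    simp only [pvSpanCont]
    split
    · simpa using ih
    · simp

theorem pvSpanCont_fst_cont (ls : List String) :
    ∀ c ∈ (pvSpanCont ls).1, PySem.Str.strip (PySem.Str.slice c none (some 12)) = "" := by
  induction ls with
  | nil => simp [pvSpanCont]
  | cons l rest ih =>
    simp only [pvSpanCont]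
    split
    · intro c hc
      rcases List.mem_cons.1 hc with h | h
      · subst h; assumption
      · exact ih c h
    · simp

theorem pvSpanCont_snd_headKeyed (ls : List String) : pvHeadKeyed (pvSpanCont ls).2 := by
  induction ls with
  | nil => simp [pvSpanCont, pvHeadKeyed]
  | cons l rest ih =>
    rw [pvSpanCont]
    by_cases h : PySem.Str.strip (PySem.Str.slice l none (some 12)) = ""
    · rw [if_pos h]
      exact ih
    · rw [if_neg h]
      intro x hx
      simp only [List.head?_cons, Option.mem_some_iff] at hx
      subst hx
      exact h

theorem pvInter_merge (sep x y : List Char) (l : List (List Char)) :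
    sep.intercalate (x :: y :: l) = sep.intercalate ((x ++ sep ++ y) :: l) := by
  cases l <;> simp [List.intercalate]

theorem pvInter_single (sep x : List Char) : sep.intercalate [x] = x := by
  simp [List.intercalate]

theorem pvJoin_cons_cons (v c : String) (cs : List String) :
    PySem.Str.join " " (v :: c :: cs) = PySem.Str.join " " ((v ++ " " ++ c) :: cs) := by
  simp only [PySem.Str.join, PySem.Chars.join, List.map_cons, String.toList_append]
  rw [pvInter_merge]

theorem pvJoin_single (v : String) : PySem.Str.join " " [v] = v := by
  simp only [PySem.Str.join, PySem.Chars.join, List.map_cons, List.map_nil]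
  rw [pvInter_single, String.ofList_toList]

theorem pvFoldlStrip_eq_join (cs : List String) : ∀ v : String,
    cs.foldl (fun a c => a ++ " " ++ PySem.Str.strip (PySem.Str.slice c (some 12) none)) v
      = PySem.Str.join " " (v :: cs.map (fun c => PySem.Str.strip (PySem.Str.slice c (some 12) none))) := by
  induction cs with
  | nil => intro v; simp only [List.foldl, List.map_nil]; rw [pvJoin_single]
  | cons c cs ih =>
    intro v
    simp only [List.foldl, List.map_cons]
    rw [ih, pvJoin_cons_cons]

theorem pvModify_insert (d : PySem.Dict String String) (k v : String) (f : String → String) :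
    (d.insert k v).modify k "" f = d.insert k (f v) := by
  simp [PySem.Dict.modify, PySem.Dict.getD_insert_self, PySem.Dict.insert_insert_self]

-- folding A's step over a run of continuation lines just extends the current value
theorem pvContRun (conts : List String)
    (hc : ∀ c ∈ conts, PySem.Str.strip (PySem.Str.slice c none (some 12)) = "") :
    ∀ (d : PySem.Dict String String) (k v : String),
    conts.foldl pvStepA (d.insert k v, some k)
      = (d.insert k (conts.foldl
          (fun a c => a ++ " " ++ PySem.Str.strip (PySem.Str.slice c (some 12) none)) v), some k) := by
  induction conts with
  | nil => intro d k v; simp [List.foldl]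
  | cons c cs ih =>
    intro d k v
    have hck := hc c (List.mem_cons_self ..)
    have hcs : ∀ c' ∈ cs, PySem.Str.strip (PySem.Str.slice c' none (some 12)) = "" :=
      fun c' h => hc c' (List.mem_cons_of_mem _ h)
    simp only [List.foldl]
    rw [show pvStepA (d.insert k v, some k) c
          = (d.insert k (v ++ " " ++ PySem.Str.strip (PySem.Str.slice c (some 12) none)), some k) by
        simp [pvStepA, hck, pvModify_insert]]
    exact ih hcs d k _

-- main correspondence: A's fold over the non-blank lines = B's insert-fold over pvRecords
theorem pvMain : ∀ (n : Nat) (ls : List String), ls.length ≤ n →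
    ∀ (d : PySem.Dict String String) (ck : Option String),
    (ck = none ∨ pvHeadKeyed ls) →
    (ls.foldl pvStepA (d, ck)).1
      = (pvRecords ls).foldl (fun d kv => d.insert kv.1 (PySem.Str.join " " kv.2)) d := by
  intro n
  induction n with
  | zero =>
    intro ls hlen d ck _
    have : ls = [] := List.length_eq_zero_iff.1 (Nat.le_zero.1 hlen)
    subst this; simp [pvRecords, List.foldl]
  | succ n ih =>
    intro ls hlen d ck hck
    cases ls with
    | nil => simp [pvRecords, List.foldl]
    | cons l t =>
      by_cases hk : PySem.Str.strip (PySem.Str.slice l none (some 12)) = ""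
      · -- continuation line at the head: ck must be none, both sides skip it
        have hnone : ck = none := by
          rcases hck with h | h
          · exact h
          · exact absurd hk (h l (by simp))
        subst hnone
        have hstep : pvStepA (d, none) l = (d, none) := by simp [pvStepA, hk]
        simp only [List.foldl, hstep]
        rw [ih t (by simpa using Nat.le_of_succ_le_succ hlen) d none (Or.inl rfl)]
        simp [pvRecords, hk]
      · -- field line: one block is consumed on both sides
        have hstep : pvStepA (d, ck) l
            = (d.insert (PySem.Str.strip (PySem.Str.slice l none (some 12)))
                 (PySem.Str.strip (PySem.Str.slice l (some 12) none)),
               some (PySem.Str.strip (PySem.Str.slice l none (some 12)))) := by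
          simp [pvStepA, hk]
        simp only [List.foldl, hstep]
        rw [← pvSpanCont_append t, List.foldl_append,
            pvContRun (pvSpanCont t).1 (pvSpanCont_fst_cont t)]
        have hlen' : (pvSpanCont t).2.length ≤ n := by
          have h1 := pvSpanCont_snd_length t
          have h2 : t.length ≤ n := by simpa using Nat.le_of_succ_le_succ hlen
          omega
        rw [ih (pvSpanCont t).2 hlen' _ _ (Or.inr (pvSpanCont_snd_headKeyed t))]
        rw [pvSpanCont_append t]
        rw [pvFoldlStrip_eq_join]
        simp only [pvRecords, hk, if_false, List.foldl]

-- ===== VERDICT (by name: the statement is the Claim_ definition above) =====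
theorem parse_flat_entry_spec : Claim_equal_parse_flat_entry := by
  intro entry_text _
  unfold Spec_parse_flat_entry parse_flat_entry parse_flat_entry_alt
  have hfold :
      (PySem.Str.splitlines entry_text).foldl
        (fun (st : PySem.Dict String String × Option String) line =>
          if PySem.Str.strip line = "" then st
          else
            let field_name := PySem.Str.strip (PySem.Str.slice line none (some 12))
            if field_name = "" then
              match st.2 with
              | some k =>
                (st.1.modify k "" (fun v => v ++ " " ++ PySem.Str.strip (PySem.Str.slice line (some 12) none)), st.2)
              | none => st
            else
              (st.1.insert field_name (PySem.Str.strip (PySem.Str.slice line (some 12) none)), some field_name))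
        (PySem.Dict.empty, none)
      = ((PySem.Str.splitlines entry_text).filter
          (fun l => decide ¬(PySem.Str.strip l = ""))).foldl pvStepA (PySem.Dict.empty, none) := by
    rw [show (fun (st : PySem.Dict String String × Option String) line =>
          if PySem.Str.strip line = "" then st
          else
            let field_name := PySem.Str.strip (PySem.Str.slice line none (some 12))
            if field_name = "" then
              match st.2 with
              | some k =>
                (st.1.modify k "" (fun v => v ++ " " ++ PySem.Str.strip (PySem.Str.slice line (some 12) none)), st.2)
              | none => st
            else
              (st.1.insert field_name (PySem.Str.strip (PySem.Str.slice line (some 12) none)), some field_name))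
        = (fun st line => if ¬(PySem.Str.strip line = "") then pvStepA st line else st) by
      funext st line
      rw [ite_not]
      rfl]
    exact PySem.List.foldl_ite_eq_foldl_filter
      (fun l => ¬(PySem.Str.strip l = "")) pvStepA (PySem.Str.splitlines entry_text) _
  simp only [hfold]
  rw [pvMain ((PySem.Str.splitlines entry_text).filter (fun l => decide ¬(PySem.Str.strip l = ""))).length
        _ le_rfl PySem.Dict.empty none (Or.inl rfl)]
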